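-- pv_equiv track=rewrite | github.com/keerthu2908-hash/plant-disease-ai | image_predictor.py | check_crop_relevance
-- ===== SOURCE A (Python) =====
-- CROP_KEYWORDS_IN_LABELS = {
--     "tomato": ["Tomato"],
--     "rice": ["Rice", "Paddy"],
--     "potato": ["Potato"],
--     "corn": ["Maize", "Corn"],
--     "maize": ["Maize", "Corn"],
--     "cotton": ["Cotton"],
--     "apple": ["Apple"],
--     "grape": ["Grape"],
--     "soybean": ["Soybean", "Soy"],
--     "groundnut": ["Groundnut", "Peanut"],
--     "sugarcane": ["Sugarcane"],
--     "wheat": ["Wheat"],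
--     "sorghum": ["Sorghum", "Jowar"],
-- }
--
-- def check_crop_relevance(predicted_label: str, selected_crop: str) -> bool:
--     if not selected_crop or selected_crop.lower() == "all":
--         return True
--
--     label_lower = predicted_label.lower().replace("_", " ").replace("-", " ")
--     crop_lower = selected_crop.lower()
--
--     supported_crop_names = {
--         name.lower()
--         for names in CROP_KEYWORDS_IN_LABELS.values()
--         for name in names
--     }
--     supported_crop_keys = {key.lower() for key in CROP_KEYWORDS_IN_LABELS}
--
--     # If selected crop is supported, use normal matching.
--     if crop_lower in supported_crop_keys or crop_lower in supported_crop_names: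
--         if crop_lower in label_lower:
--             return True
--
--         for crop_key, crop_names in CROP_KEYWORDS_IN_LABELS.items():
--             if crop_lower in [n.lower() for n in crop_names] or crop_lower == crop_key:
--                 for name in crop_names:
--                     if name.lower() in label_lower:
--                         return True
--
--         has_any_crop = any(
--             name.lower() in label_lower
--             for names in CROP_KEYWORDS_IN_LABELS.values()
--             for name in names
--         )
--         if not has_any_crop:
--             return True
--
--         return False
--
--     # If selected crop is unsupported (for example, okra), reject labels
--     # that explicitly mention any known other crop.
--     has_known_other_crop = any(
--         name.lower() in label_lower
--         for names in CROP_KEYWORDS_IN_LABELS.values()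
--         for name in names
--     )
--
--     if has_known_other_crop:
--         return False
--
--     return True
-- ===== SOURCE B (Python) =====
-- CROP_KEYWORDS_IN_LABELS = {
--     "tomato": ["Tomato"],
--     "rice": ["Rice", "Paddy"],
--     "potato": ["Potato"],
--     "corn": ["Maize", "Corn"],
--     "maize": ["Maize", "Corn"],
--     "cotton": ["Cotton"],
--     "apple": ["Apple"],
--     "grape": ["Grape"],
--     "soybean": ["Soybean", "Soy"],
--     "groundnut": ["Groundnut", "Peanut"],
--     "sugarcane": ["Sugarcane"],
--     "wheat": ["Wheat"],
--     "sorghum": ["Sorghum", "Jowar"],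
-- }
--
-- def check_crop_relevance(predicted_label: str, selected_crop: str) -> bool:
--     if not selected_crop or selected_crop.lower() == "all":
--         return True
--     label_lower = predicted_label.lower().replace("_", " ").replace("-", " ")
--     crop_lower = selected_crop.lower()
--     present = any(
--         name.lower() in label_lower
--         for names in CROP_KEYWORDS_IN_LABELS.values()
--         for name in names
--     )
--     matched = any(
--         name.lower() in label_lower
--         for key, names in CROP_KEYWORDS_IN_LABELS.items()
--         if crop_lower == key or crop_lower in (n.lower() for n in names)
--         for name in names
--     )
--     return matched or not present
-- ===== Notes on version B (the rewrite author's own statement) =====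
-- stated objective: simpler
-- what changed: Replaced A's two separate supported/unsupported branches (direct-substring check, nested synonym loop with early returns, duplicated any-known-crop scans) by two booleans computed once - 'present' (any dict keyword occurs in the normalized label) and 'matched' (some keyword of a key group matching the selected crop occurs) - returning 'matched or not present'.
import Mathlib
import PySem

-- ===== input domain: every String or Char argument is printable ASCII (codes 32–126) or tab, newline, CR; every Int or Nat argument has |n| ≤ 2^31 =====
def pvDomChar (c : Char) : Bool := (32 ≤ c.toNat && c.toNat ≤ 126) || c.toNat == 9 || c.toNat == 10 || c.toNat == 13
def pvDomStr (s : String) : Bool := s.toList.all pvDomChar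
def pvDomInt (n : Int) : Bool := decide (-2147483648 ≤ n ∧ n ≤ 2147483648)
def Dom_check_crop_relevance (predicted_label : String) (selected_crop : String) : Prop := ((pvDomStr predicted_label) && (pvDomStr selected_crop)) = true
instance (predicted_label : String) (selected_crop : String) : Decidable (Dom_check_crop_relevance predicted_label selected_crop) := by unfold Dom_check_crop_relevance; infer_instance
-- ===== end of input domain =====

-- B collapses A's supported/unsupported branches into the single boolean 'matched || not present' computed in one pass over the keyword dict (objective: simpler; same return value everywhere).

-- the module-level constant CROP_KEYWORDS_IN_LABELS (shared data used by both ports)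
def pvCROPS : List (String × List String) :=
  [("tomato", ["Tomato"]), ("rice", ["Rice", "Paddy"]), ("potato", ["Potato"]),
   ("corn", ["Maize", "Corn"]), ("maize", ["Maize", "Corn"]), ("cotton", ["Cotton"]),
   ("apple", ["Apple"]), ("grape", ["Grape"]), ("soybean", ["Soybean", "Soy"]),
   ("groundnut", ["Groundnut", "Peanut"]), ("sugarcane", ["Sugarcane"]),
   ("wheat", ["Wheat"]), ("sorghum", ["Sorghum", "Jowar"])]

-- ===== PORT A =====
def check_crop_relevance (predicted_label : String) (selected_crop : String) : Bool :=
  if selected_crop == "" || PySem.Str.lower selected_crop == "all" then true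
  else
    let label_lower := PySem.Str.replace (PySem.Str.replace (PySem.Str.lower predicted_label) "_" " ") "-" " "
    let crop_lower := PySem.Str.lower selected_crop
    let supported_crop_names := PySem.Set.ofList (pvCROPS.flatMap (fun p => p.2.map PySem.Str.lower))
    let supported_crop_keys := PySem.Set.ofList (pvCROPS.map (fun p => PySem.Str.lower p.1))
    if PySem.Set.contains supported_crop_keys crop_lower || PySem.Set.contains supported_crop_names crop_lower then
      -- supported crop: direct match, then synonym loop, then "no known crop mentioned"
      if PySem.Str.isIn crop_lower label_lower then true
      else if pvCROPS.any (fun p =>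
              ((p.2.map PySem.Str.lower).contains crop_lower || crop_lower == p.1) &&
              p.2.any (fun name => PySem.Str.isIn (PySem.Str.lower name) label_lower)) then true
      else if ! pvCROPS.any (fun p => p.2.any (fun name => PySem.Str.isIn (PySem.Str.lower name) label_lower)) then true
      else false
    else
      -- unsupported crop: reject labels that mention any known other crop
      if pvCROPS.any (fun p => p.2.any (fun name => PySem.Str.isIn (PySem.Str.lower name) label_lower)) then false
      else true

-- ===== PORT B =====
def check_crop_relevance_alt (predicted_label : String) (selected_crop : String) : Bool :=
  if selected_crop == "" || PySem.Str.lower selected_crop == "all" then true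
  else
    let label_lower := PySem.Str.replace (PySem.Str.replace (PySem.Str.lower predicted_label) "_" " ") "-" " "
    let crop_lower := PySem.Str.lower selected_crop
    let present := pvCROPS.any (fun p => p.2.any (fun name => PySem.Str.isIn (PySem.Str.lower name) label_lower))
    let matched := pvCROPS.any (fun p =>
      (crop_lower == p.1 || p.2.any (fun n => PySem.Str.lower n == crop_lower)) &&
      p.2.any (fun name => PySem.Str.isIn (PySem.Str.lower name) label_lower))
    matched || ! present

-- ===== PRECONDITION & SPEC =====
def Spec_check_crop_relevance (predicted_label : String) (selected_crop : String) (out : Bool) : Prop := out = check_crop_relevance_alt predicted_label selected_crop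
instance (predicted_label : String) (selected_crop : String) (out : Bool) : Decidable (Spec_check_crop_relevance predicted_label selected_crop out) := by unfold Spec_check_crop_relevance; infer_instance

-- ===== CLAIM (what is proved, stated in full; the proofs are below) =====
def Claim_equal_check_crop_relevance : Prop := ∀ (predicted_label : String) (selected_crop : String), Dom_check_crop_relevance predicted_label selected_crop → Spec_check_crop_relevance predicted_label selected_crop (check_crop_relevance predicted_label selected_crop)

-- ===== LEMMAS AND PROOFS =====

-- evaluated lowercasings of the dict's keyword strings (String- and Chars-level)
theorem pvlowC0 : PySem.Chars.lower ['T', 'o', 'm', 'a', 't', 'o'] = ['t', 'o', 'm', 'a', 't', 'o'] := by decide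
theorem pvlowS0 : PySem.Str.lower "Tomato" = "tomato" := by decide
theorem pvlowC1 : PySem.Chars.lower ['R', 'i', 'c', 'e'] = ['r', 'i', 'c', 'e'] := by decide
theorem pvlowS1 : PySem.Str.lower "Rice" = "rice" := by decide
theorem pvlowC2 : PySem.Chars.lower ['P', 'a', 'd', 'd', 'y'] = ['p', 'a', 'd', 'd', 'y'] := by decide
theorem pvlowS2 : PySem.Str.lower "Paddy" = "paddy" := by decide
theorem pvlowC3 : PySem.Chars.lower ['P', 'o', 't', 'a', 't', 'o'] = ['p', 'o', 't', 'a', 't', 'o'] := by decide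
theorem pvlowS3 : PySem.Str.lower "Potato" = "potato" := by decide
theorem pvlowC4 : PySem.Chars.lower ['M', 'a', 'i', 'z', 'e'] = ['m', 'a', 'i', 'z', 'e'] := by decide
theorem pvlowS4 : PySem.Str.lower "Maize" = "maize" := by decide
theorem pvlowC5 : PySem.Chars.lower ['C', 'o', 'r', 'n'] = ['c', 'o', 'r', 'n'] := by decide
theorem pvlowS5 : PySem.Str.lower "Corn" = "corn" := by decide
theorem pvlowC6 : PySem.Chars.lower ['C', 'o', 't', 't', 'o', 'n'] = ['c', 'o', 't', 't', 'o', 'n'] := by decide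
theorem pvlowS6 : PySem.Str.lower "Cotton" = "cotton" := by decide
theorem pvlowC7 : PySem.Chars.lower ['A', 'p', 'p', 'l', 'e'] = ['a', 'p', 'p', 'l', 'e'] := by decide
theorem pvlowS7 : PySem.Str.lower "Apple" = "apple" := by decide
theorem pvlowC8 : PySem.Chars.lower ['G', 'r', 'a', 'p', 'e'] = ['g', 'r', 'a', 'p', 'e'] := by decide
theorem pvlowS8 : PySem.Str.lower "Grape" = "grape" := by decide
theorem pvlowC9 : PySem.Chars.lower ['S', 'o', 'y', 'b', 'e', 'a', 'n'] = ['s', 'o', 'y', 'b', 'e', 'a', 'n'] := by decide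
theorem pvlowS9 : PySem.Str.lower "Soybean" = "soybean" := by decide
theorem pvlowC10 : PySem.Chars.lower ['S', 'o', 'y'] = ['s', 'o', 'y'] := by decide
theorem pvlowS10 : PySem.Str.lower "Soy" = "soy" := by decide
theorem pvlowC11 : PySem.Chars.lower ['G', 'r', 'o', 'u', 'n', 'd', 'n', 'u', 't'] = ['g', 'r', 'o', 'u', 'n', 'd', 'n', 'u', 't'] := by decide
theorem pvlowS11 : PySem.Str.lower "Groundnut" = "groundnut" := by decide
theorem pvlowC12 : PySem.Chars.lower ['P', 'e', 'a', 'n', 'u', 't'] = ['p', 'e', 'a', 'n', 'u', 't'] := by decide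
theorem pvlowS12 : PySem.Str.lower "Peanut" = "peanut" := by decide
theorem pvlowC13 : PySem.Chars.lower ['S', 'u', 'g', 'a', 'r', 'c', 'a', 'n', 'e'] = ['s', 'u', 'g', 'a', 'r', 'c', 'a', 'n', 'e'] := by decide
theorem pvlowS13 : PySem.Str.lower "Sugarcane" = "sugarcane" := by decide
theorem pvlowC14 : PySem.Chars.lower ['W', 'h', 'e', 'a', 't'] = ['w', 'h', 'e', 'a', 't'] := by decide
theorem pvlowS14 : PySem.Str.lower "Wheat" = "wheat" := by decide
theorem pvlowC15 : PySem.Chars.lower ['S', 'o', 'r', 'g', 'h', 'u', 'm'] = ['s', 'o', 'r', 'g', 'h', 'u', 'm'] := by decide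
theorem pvlowS15 : PySem.Str.lower "Sorghum" = "sorghum" := by decide
theorem pvlowC16 : PySem.Chars.lower ['J', 'o', 'w', 'a', 'r'] = ['j', 'o', 'w', 'a', 'r'] := by decide
theorem pvlowS16 : PySem.Str.lower "Jowar" = "jowar" := by decide

-- ===== VERDICT (by name: the statement is the Claim_ definition above) =====
set_option maxHeartbeats 2000000 in
theorem check_crop_relevance_spec : Claim_equal_check_crop_relevance := by
  intro lab crop _
  show check_crop_relevance lab crop = check_crop_relevance_alt lab crop
  unfold check_crop_relevance check_crop_relevance_alt
  by_cases hg : (crop == "" || PySem.Str.lower crop == "all") = true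
  · simp [hg]
  · simp only [hg, if_false, Bool.false_eq_true]
    generalize (PySem.Str.replace (PySem.Str.replace (PySem.Str.lower lab) "_" " ") "-" " ") = L
    generalize hcdef : PySem.Str.lower crop = c
    rw [show PySem.Set.ofList (pvCROPS.map (fun p => PySem.Str.lower p.1)) =
        ["tomato","rice","potato","corn","maize","cotton","apple","grape","soybean","groundnut","sugarcane","wheat","sorghum"] from by decide,
       show PySem.Set.ofList (pvCROPS.flatMap (fun p => p.2.map PySem.Str.lower)) =
        ["tomato","rice","paddy","potato","maize","corn","cotton","apple","grape","soybean","soy","groundnut","peanut","sugarcane","wheat","sorghum","jowar"] from by decide]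
    by_cases hs : (PySem.Set.contains ["tomato","rice","potato","corn","maize","cotton","apple","grape","soybean","groundnut","sugarcane","wheat","sorghum"] c
        || PySem.Set.contains ["tomato","rice","paddy","potato","maize","corn","cotton","apple","grape","soybean","soy","groundnut","peanut","sugarcane","wheat","sorghum","jowar"] c) = true
    · rw [if_pos hs]
      simp only [Bool.or_eq_true, PySem.Set.contains_eq_listContains,
        List.contains_eq_mem, decide_eq_true_eq, List.mem_cons, List.not_mem_nil, or_false] at hs
      clear hcdef
      rcases hs with (rfl|rfl|rfl|rfl|rfl|rfl|rfl|rfl|rfl|rfl|rfl|rfl|rfl)|(rfl|rfl|rfl|rfl|rfl|rfl|rfl|rfl|rfl|rfl|rfl|rfl|rfl|rfl|rfl|rfl|rfl) <;>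
        (simp [pvCROPS, pvlowC0, pvlowS0, pvlowC1, pvlowS1, pvlowC2, pvlowS2, pvlowC3, pvlowS3, pvlowC4, pvlowS4, pvlowC5, pvlowS5, pvlowC6, pvlowS6, pvlowC7, pvlowS7, pvlowC8, pvlowS8, pvlowC9, pvlowS9, pvlowC10, pvlowS10, pvlowC11, pvlowS11, pvlowC12, pvlowS12, pvlowC13, pvlowS13, pvlowC14, pvlowS14, pvlowC15, pvlowS15, pvlowC16, pvlowS16]) <;> tauto
    · rw [if_neg hs]
      simp only [Bool.or_eq_true, PySem.Set.contains_eq_listContains, List.contains_eq_mem,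
        decide_eq_true_eq, List.mem_cons, List.not_mem_nil, or_false, not_or] at hs
      obtain ⟨⟨n1,n2,n3,n4,n5,n6,n7,n8,n9,n10,n11,n12,n13⟩, m1,m2,m3,m4,m5,m6,m7,m8,m9,m10,m11,m12,m13,m14,m15,m16,m17⟩ := hs
      have e0 : (c == "tomato") = false := by simp [n1]
      have e1 : (c == "rice") = false := by simp [n2]
      have e2 : (c == "potato") = false := by simp [n3]
      have e3 : (c == "corn") = false := by simp [n4]
      have e4 : (c == "maize") = false := by simp [n5]
      have e5 : (c == "cotton") = false := by simp [n6]
      have e6 : (c == "apple") = false := by simp [n7]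
      have e7 : (c == "grape") = false := by simp [n8]
      have e8 : (c == "soybean") = false := by simp [n9]
      have e9 : (c == "groundnut") = false := by simp [n10]
      have e10 : (c == "sugarcane") = false := by simp [n11]
      have e11 : (c == "wheat") = false := by simp [n12]
      have e12 : (c == "sorghum") = false := by simp [n13]
      have f0 : (("tomato" : String) == c) = false := by simp [Ne.symm m1]
      have f1 : (("rice" : String) == c) = false := by simp [Ne.symm m2]
      have f2 : (("paddy" : String) == c) = false := by simp [Ne.symm m3]
      have f3 : (("potato" : String) == c) = false := by simp [Ne.symm m4]
      have f4 : (("maize" : String) == c) = false := by simp [Ne.symm m5]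
      have f5 : (("corn" : String) == c) = false := by simp [Ne.symm m6]
      have f6 : (("cotton" : String) == c) = false := by simp [Ne.symm m7]
      have f7 : (("apple" : String) == c) = false := by simp [Ne.symm m8]
      have f8 : (("grape" : String) == c) = false := by simp [Ne.symm m9]
      have f9 : (("soybean" : String) == c) = false := by simp [Ne.symm m10]
      have f10 : (("soy" : String) == c) = false := by simp [Ne.symm m11]
      have f11 : (("groundnut" : String) == c) = false := by simp [Ne.symm m12]
      have f12 : (("peanut" : String) == c) = false := by simp [Ne.symm m13]
      have f13 : (("sugarcane" : String) == c) = false := by simp [Ne.symm m14]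
      have f14 : (("wheat" : String) == c) = false := by simp [Ne.symm m15]
      have f15 : (("sorghum" : String) == c) = false := by simp [Ne.symm m16]
      have f16 : (("jowar" : String) == c) = false := by simp [Ne.symm m17]
      have hM : pvCROPS.any (fun p =>
            (c == p.1 || p.2.any (fun n => PySem.Str.lower n == c)) &&
            p.2.any (fun name => PySem.Str.isIn (PySem.Str.lower name) L)) = false := by
        simp only [pvCROPS, List.any_cons, List.any_nil, pvlowS0, pvlowS1, pvlowS2, pvlowS3, pvlowS4, pvlowS5, pvlowS6, pvlowS7, pvlowS8, pvlowS9, pvlowS10, pvlowS11, pvlowS12, pvlowS13, pvlowS14, pvlowS15, pvlowS16, e0, e1, e2, e3, e4, e5, e6, e7, e8, e9, e10, e11, e12, f0, f1, f2, f3, f4, f5, f6, f7, f8, f9, f10, f11, f12, f13, f14, f15, f16]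
        simp
      rw [hM]
      cases hP : pvCROPS.any (fun p => p.2.any (fun name => PySem.Str.isIn (PySem.Str.lower name) L)) <;> simp
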